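-- pv_equiv track=rewrite | github.com/alumnos-ingcom/C2-TP3--diazvaned | tp4ej2.py | suma_lenta
-- ===== SOURCE A (Python) =====
-- def suma_lenta(numero, otro_numero):
--     resultado = (f"{numero}")
--     while (otro_numero != 0):
--         if otro_numero < 0:
--             otro_numero = otro_numero + 1
--             numero = numero - 1
--             resultado = resultado + " + (- 1)"
--         if otro_numero > 0:
--             otro_numero = otro_numero -1
--             numero = numero + 1
--             resultado = resultado + " + 1"
--
--     return resultado + (f" = {numero}")
-- ===== SOURCE B (Python) =====
-- def suma_lenta(numero, otro_numero):
--     term = " + 1" if otro_numero >= 0 else " + (- 1)"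
--     return f"{numero}" + term * abs(otro_numero) + f" = {numero + otro_numero}"
-- ===== Notes on version B (the rewrite author's own statement) =====
-- stated objective: simpler
-- what changed: The while-loop that repeatedly decrements the counter and concatenates one term per unit is replaced by a closed form: pick the term by the sign of otro_numero, repeat it abs(otro_numero) times with string multiplication, and append numero + otro_numero directly.
import Mathlib
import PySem

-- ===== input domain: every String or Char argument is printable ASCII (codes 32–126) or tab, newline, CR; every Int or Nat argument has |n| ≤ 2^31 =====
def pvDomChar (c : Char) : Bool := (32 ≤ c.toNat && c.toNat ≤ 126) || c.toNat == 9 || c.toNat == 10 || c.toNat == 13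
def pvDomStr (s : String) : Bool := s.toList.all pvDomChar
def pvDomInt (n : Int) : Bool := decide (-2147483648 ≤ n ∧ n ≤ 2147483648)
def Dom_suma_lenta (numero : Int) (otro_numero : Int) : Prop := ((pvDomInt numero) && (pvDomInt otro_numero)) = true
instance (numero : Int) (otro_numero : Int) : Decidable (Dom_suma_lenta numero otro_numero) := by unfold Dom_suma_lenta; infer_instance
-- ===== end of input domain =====

-- B replaces the unit-by-unit while-loop with a closed form (sign-chosen term repeated |otro_numero| times); objective: simpler.

-- ===== PORT A =====
-- the while-loop of A: state (numero, otro_numero, resultado); two sequential ifs per iteration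
def suma_lenta_loop (numero : Int) (otro : Int) (resultado : String) : Int × String :=
  if otro = 0 then (numero, resultado)
  else
    let s1 : Int × Int × String :=
      if otro < 0 then (numero - 1, otro + 1, resultado ++ " + (- 1)") else (numero, otro, resultado)
    let s2 : Int × Int × String :=
      if s1.2.1 > 0 then (s1.1 + 1, s1.2.1 - 1, s1.2.2 ++ " + 1") else s1
    suma_lenta_loop s2.1 s2.2.1 s2.2.2
termination_by otro.natAbs
decreasing_by
  split_ifs <;> (try simp at *) <;> omega

def suma_lenta (numero : Int) (otro_numero : Int) : String :=
  let p := suma_lenta_loop numero otro_numero (PySem.Int.toStr numero)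
  p.2 ++ " = " ++ PySem.Int.toStr p.1

-- ===== PORT B =====
-- Python's 'term * n' (string repetition)
def strMul (s : String) : Nat → String
  | 0 => ""
  | n + 1 => s ++ strMul s n

def suma_lenta_alt (numero : Int) (otro_numero : Int) : String :=
  let term := if otro_numero ≥ 0 then " + 1" else " + (- 1)"
  PySem.Int.toStr numero ++ strMul term otro_numero.natAbs ++ " = " ++ PySem.Int.toStr (numero + otro_numero)

-- ===== PRECONDITION & SPEC =====
def Spec_suma_lenta (numero : Int) (otro_numero : Int) (out : String) : Prop := out = suma_lenta_alt numero otro_numero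
instance (numero : Int) (otro_numero : Int) (out : String) : Decidable (Spec_suma_lenta numero otro_numero out) := by unfold Spec_suma_lenta; infer_instance

-- ===== CLAIM (what is proved, stated in full; the proofs are below) =====
def Claim_equal_suma_lenta : Prop := ∀ (numero : Int) (otro_numero : Int), Dom_suma_lenta numero otro_numero → Spec_suma_lenta numero otro_numero (suma_lenta numero otro_numero)

-- ===== LEMMAS AND PROOFS =====

theorem loop_pos (k : Nat) : ∀ (n : Int) (r : String),
    suma_lenta_loop n (k : Int) r = (n + k, r ++ strMul " + 1" k) := by
  induction k with
  | zero => intro n r; rw [suma_lenta_loop]; simp [strMul]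
  | succ k ih =>
    intro n r
    rw [suma_lenta_loop]
    have h0 : ((k : Int) + 1) ≠ 0 := by omega
    have h1 : ¬ ((k : Int) + 1 < 0) := by omega
    have h2 : ((k : Int) + 1 > 0) := by omega
    simp only [Nat.cast_succ, h0, h1, h2, if_pos, if_false]
    rw [show (k : Int) + 1 - 1 = (k : Int) from by omega, ih]
    simp [strMul, String.append_assoc]
    omega

theorem loop_neg (k : Nat) : ∀ (n : Int) (r : String),
    suma_lenta_loop n (-(k : Int)) r = (n - k, r ++ strMul " + (- 1)" k) := by
  induction k with
  | zero => intro n r; rw [suma_lenta_loop]; simp [strMul]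
  | succ k ih =>
    intro n r
    rw [suma_lenta_loop]
    have h0 : (-((k : Nat) + 1 : Int)) ≠ 0 := by omega
    have h1 : (-((k : Nat) + 1 : Int) < 0) := by omega
    have h2 : ¬ (-((k : Nat) + 1 : Int) + 1 > 0) := by omega
    simp only [Nat.cast_succ, h0, h1, h2, if_pos, ite_false]
    rw [show (-((k : Int) + 1) + 1) = -(k : Int) by omega, ih]
    simp [strMul, String.append_assoc]
    omega

-- ===== VERDICT (by name: the statement is the Claim_ definition above) =====
theorem suma_lenta_spec : Claim_equal_suma_lenta := by
  intro numero otro _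
  unfold Spec_suma_lenta suma_lenta suma_lenta_alt
  by_cases h : 0 ≤ otro
  · obtain ⟨k, rfl⟩ : ∃ k : Nat, otro = (k : Int) := ⟨otro.toNat, by omega⟩
    rw [loop_pos]
    simp [h]
  · obtain ⟨k, rfl⟩ : ∃ k : Nat, otro = -(k : Int) := ⟨otro.natAbs, by omega⟩
    rw [loop_neg]
    simp [show k ≠ 0 from by omega, sub_eq_add_neg]
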